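-- pv_equiv track=rewrite | github.com/brandon-fryslie/cc-dump | scripts-tmp/har_checkpoint_diff.py | _counter_delta
-- ===== SOURCE A (Python) =====
-- from collections import Counter
--
-- def _counter_delta(before: Counter[str], after: Counter[str]) -> Counter[str]:
--     keys = sorted(set(before) | set(after))
--     delta: Counter[str] = Counter()
--     for key in keys:
--         diff = after.get(key, 0) - before.get(key, 0)
--         if diff != 0:
--             delta[key] = diff
--     return delta
-- ===== SOURCE B (Python) =====
-- from collections import Counter
--
-- def _counter_delta(before: Counter[str], after: Counter[str]) -> Counter[str]:
--     b = sorted(dict(before).items(), key=lambda kv: kv[0])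
--     a = sorted(dict(after).items(), key=lambda kv: kv[0])
--     pairs = []
--     i = j = 0
--     while i < len(b) and j < len(a):
--         bk, bv = b[i]
--         ak, av = a[j]
--         if bk < ak:
--             pairs.append((bk, -bv)); i += 1
--         elif ak < bk:
--             pairs.append((ak, av)); j += 1
--         else:
--             pairs.append((ak, av - bv)); i += 1; j += 1
--     pairs.extend((k, -v) for k, v in b[i:])
--     pairs.extend(a[j:])
--     return Counter({k: d for k, d in pairs if d != 0})
-- ===== Notes on version B (the rewrite author's own statement) =====
-- stated objective: alternative
-- what changed: A builds the sorted union of the two key sets and looks each key up in both counters inside the loop; B instead sorts the two item lists once and computes every signed delta in a single two-pointer merge-join pass (with negated/kept tails), then drops the zero deltas.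
import Mathlib
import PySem

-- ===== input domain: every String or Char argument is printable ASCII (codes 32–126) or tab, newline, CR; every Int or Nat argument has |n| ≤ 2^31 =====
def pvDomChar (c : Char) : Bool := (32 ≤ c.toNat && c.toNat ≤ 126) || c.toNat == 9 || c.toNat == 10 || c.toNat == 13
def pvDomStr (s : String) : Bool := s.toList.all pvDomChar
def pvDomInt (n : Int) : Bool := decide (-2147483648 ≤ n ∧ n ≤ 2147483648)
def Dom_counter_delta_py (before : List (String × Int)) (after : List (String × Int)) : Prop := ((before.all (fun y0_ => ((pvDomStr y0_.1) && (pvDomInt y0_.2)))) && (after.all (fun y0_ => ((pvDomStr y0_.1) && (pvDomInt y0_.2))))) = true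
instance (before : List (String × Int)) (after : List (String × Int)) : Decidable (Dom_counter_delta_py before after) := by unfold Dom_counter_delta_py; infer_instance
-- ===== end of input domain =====

-- B replaces A's sorted-key-union-with-per-key-lookups by a merge-join: sort both item lists once and
-- compute all deltas in a single two-pointer merge pass (alternative algorithm; same asymptotic cost).

-- ===== PORT A =====
-- keys = sorted(set(before) | set(after)); loop computing each diff via .get, keeping nonzero ones
def counter_delta_py (before : List (String × Int)) (after : List (String × Int)) : List (String × Int) :=
  let db : PySem.Dict String Int := PySem.Dict.ofList before
  let da : PySem.Dict String Int := PySem.Dict.ofList after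
  let keys := PySem.List.sorted (PySem.Set.union (PySem.Set.ofList db.keys) da.keys) (fun k => k) false
  (keys.foldl (fun (delta : PySem.Dict String Int) key =>
      let diff := da.getD key 0 - db.getD key 0
      if diff ≠ 0 then delta.insert key diff else delta) PySem.Dict.empty).items

-- ===== PORT B =====
-- the two-pointer while loop over the two sorted item lists, plus the two tail extends
def pvMergeDelta : List (String × Int) → List (String × Int) → List (String × Int)
  | (bk, bv) :: bs, (ak, av) :: as_ =>
    if bk < ak then (bk, -bv) :: pvMergeDelta bs ((ak, av) :: as_)
    else if ak < bk then (ak, av) :: pvMergeDelta ((bk, bv) :: bs) as_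
    else (ak, av - bv) :: pvMergeDelta bs as_
  | [], as_ => as_
  | bs, [] => bs.map (fun p => (p.1, -p.2))
termination_by b a => b.length + a.length

-- b = sorted(dict(before).items(), key=...); a likewise; merge; keep nonzero; Counter(dict-comprehension)
def counter_delta_py_alt (before : List (String × Int)) (after : List (String × Int)) : List (String × Int) :=
  let b := PySem.List.sorted (PySem.Dict.ofList before).items (fun kv => kv.1) false
  let a := PySem.List.sorted (PySem.Dict.ofList after).items (fun kv => kv.1) false
  let pairs := (pvMergeDelta b a).filter (fun p => decide (p.2 ≠ 0))
  (PySem.Dict.ofList pairs).items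

-- ===== PRECONDITION & SPEC =====
def Spec_counter_delta_py (before : List (String × Int)) (after : List (String × Int)) (out : List (String × Int)) : Prop := out = counter_delta_py_alt before after
instance (before : List (String × Int)) (after : List (String × Int)) (out : List (String × Int)) : Decidable (Spec_counter_delta_py before after out) := by unfold Spec_counter_delta_py; infer_instance

-- ===== CLAIM (what is proved, stated in full; the proofs are below) =====
def Claim_equal_counter_delta_py : Prop := ∀ (before : List (String × Int)) (after : List (String × Int)), Dom_counter_delta_py before after → Spec_counter_delta_py before after (counter_delta_py before after)

-- ===== LEMMAS AND PROOFS =====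

-- the key order the merge produces (proof-only helper)
def pvMergeKeys : List String → List String → List String
  | b :: bs, a :: as_ =>
    if b < a then b :: pvMergeKeys bs (a :: as_)
    else if a < b then a :: pvMergeKeys (b :: bs) as_
    else a :: pvMergeKeys bs as_
  | [], as_ => as_
  | bs, [] => bs
termination_by u v => u.length + v.length

theorem pv_mem_mergeKeys (u v : List String) (x : String) :
    x ∈ pvMergeKeys u v ↔ x ∈ u ∨ x ∈ v := by
  induction u, v using pvMergeKeys.induct with
  | case1 b bs a as_ h ih => simp [pvMergeKeys, h, ih]; tauto
  | case2 b bs a as_ h h' ih => simp [pvMergeKeys, h, h', ih]; tauto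
  | case3 b bs a as_ h h' ih =>
    have hba : b = a := le_antisymm (not_lt.mp h') (not_lt.mp h)
    simp [pvMergeKeys, hba, ih]; tauto
  | case4 as_ => simp [pvMergeKeys]
  | case5 bs h =>
    cases bs with
    | nil => exact absurd rfl h
    | cons p t => simp [pvMergeKeys]

theorem pv_pairwise_mergeKeys (u v : List String)
    (hu : u.Pairwise (· < ·)) (hv : v.Pairwise (· < ·)) :
    (pvMergeKeys u v).Pairwise (· < ·) := by
  induction u, v using pvMergeKeys.induct with
  | case1 b bs a as_ h ih =>
    rw [List.pairwise_cons] at hu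
    simp only [pvMergeKeys, h, if_true]
    rw [List.pairwise_cons]
    refine ⟨?_, ih hu.2 hv⟩
    intro y hy
    rcases (pv_mem_mergeKeys _ _ _).mp hy with hyb | hya
    · exact hu.1 y hyb
    · rcases List.mem_cons.mp hya with rfl | hmem
      · exact h
      · exact lt_trans h ((List.pairwise_cons.mp hv).1 y hmem)
  | case2 b bs a as_ h h' ih =>
    rw [List.pairwise_cons] at hv
    simp only [pvMergeKeys, h, h', if_false, if_true]
    rw [List.pairwise_cons]
    refine ⟨?_, ih hu hv.2⟩
    intro y hy
    rcases (pv_mem_mergeKeys _ _ _).mp hy with hyb | hya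
    · rcases List.mem_cons.mp hyb with rfl | hmem
      · exact h'
      · exact lt_trans h' ((List.pairwise_cons.mp hu).1 y hmem)
    · exact hv.1 y hya
  | case3 b bs a as_ h h' ih =>
    have hba : b = a := le_antisymm (not_lt.mp h') (not_lt.mp h)
    rw [List.pairwise_cons] at hu hv
    simp only [pvMergeKeys, h, h', if_false]
    rw [List.pairwise_cons]
    refine ⟨?_, ih hu.2 hv.2⟩
    intro y hy
    rcases (pv_mem_mergeKeys _ _ _).mp hy with hyb | hya
    · exact hba ▸ hu.1 y hyb
    · exact hv.1 y hya
  | case4 as_ => simpa [pvMergeKeys] using hv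
  | case5 bs h =>
    cases bs with
    | nil => exact absurd rfl h
    | cons p t => simpa [pvMergeKeys] using hu

theorem pv_pairwise_lt_of_le_nodup (l : List String)
    (hle : l.Pairwise (· ≤ ·)) (hnd : l.Nodup) : l.Pairwise (· < ·) :=
  (hle.and hnd).imp (fun h => lt_of_le_of_ne h.1 h.2)

theorem pv_mergeDelta_eq (fb fa : String → Int) (b a : List (String × Int))
    (hb : ∀ p ∈ b, fb p.1 = p.2) (ha : ∀ p ∈ a, fa p.1 = p.2)
    (hb0 : ∀ k ∈ a.map Prod.fst, k ∉ b.map Prod.fst → fb k = 0)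
    (ha0 : ∀ k ∈ b.map Prod.fst, k ∉ a.map Prod.fst → fa k = 0)
    (hbs : b.Pairwise (fun p q => p.1 < q.1)) (has : a.Pairwise (fun p q => p.1 < q.1)) :
    pvMergeDelta b a = (pvMergeKeys (b.map Prod.fst) (a.map Prod.fst)).map (fun k => (k, fa k - fb k)) := by
  induction b, a using pvMergeDelta.induct with
  | case1 bk bv bs ak av as_ h ih =>
    -- bk < ak : bk is absent from the a side
    have hnb : bk ∉ ((ak, av) :: as_).map Prod.fst := by
      simp only [List.map_cons, List.mem_cons]
      rintro (rfl | hmem)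
      · exact absurd h (lt_irrefl _)
      · rcases List.mem_map.mp hmem with ⟨q, hq, hqk⟩
        exact absurd (hqk ▸ (List.pairwise_cons.mp has).1 q hq) (by intro hlt; exact absurd (lt_trans h hlt) (lt_irrefl _))
    have hfa : fa bk = 0 := ha0 bk (by simp) hnb
    have hfb : fb bk = bv := hb (bk, bv) List.mem_cons_self
    simp only [pvMergeDelta, pvMergeKeys, List.map_cons, if_pos h, List.map]
    refine List.cons_eq_cons.mpr ⟨by simp [hfa, hfb], ?_⟩
    refine ih (fun p hp => hb p (List.mem_cons_of_mem _ hp)) ha ?_ ?_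
        (List.pairwise_cons.mp hbs).2 has
    · intro k hk hknb
      refine hb0 k hk ?_
      simp only [List.map_cons, List.mem_cons]
      rintro (rfl | hmem)
      · exact hnb hk
      · exact hknb hmem
    · intro k hk hkna
      exact ha0 k (by simp only [List.map_cons, List.mem_cons]; exact Or.inr hk) hkna
  | case2 bk bv bs ak av as_ h h' ih =>
    -- ak < bk : ak is absent from the b side
    have hna : ak ∉ ((bk, bv) :: bs).map Prod.fst := by
      simp only [List.map_cons, List.mem_cons]
      rintro (rfl | hmem)
      · exact absurd h' (lt_irrefl _)
      · rcases List.mem_map.mp hmem with ⟨q, hq, hqk⟩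
        exact absurd (hqk ▸ (List.pairwise_cons.mp hbs).1 q hq) (by intro hlt; exact absurd (lt_trans h' hlt) (lt_irrefl _))
    have hfb : fb ak = 0 := hb0 ak (by simp) hna
    have hfa : fa ak = av := ha (ak, av) List.mem_cons_self
    simp only [pvMergeDelta, pvMergeKeys, List.map_cons, if_neg h, if_pos h', List.map]
    refine List.cons_eq_cons.mpr ⟨by simp [hfa, hfb], ?_⟩
    refine ih hb (fun p hp => ha p (List.mem_cons_of_mem _ hp)) ?_ ?_
        hbs (List.pairwise_cons.mp has).2
    · intro k hk hknb
      exact hb0 k (by simp only [List.map_cons, List.mem_cons]; exact Or.inr hk) hknb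
    · intro k hk hkna
      refine ha0 k hk ?_
      simp only [List.map_cons, List.mem_cons]
      rintro (rfl | hmem)
      · exact hna hk
      · exact hkna hmem
  | case3 bk bv bs ak av as_ h h' ih =>
    -- equal keys
    have hba : bk = ak := le_antisymm (not_lt.mp h') (not_lt.mp h)
    subst hba
    have hfb : fb bk = bv := hb (bk, bv) List.mem_cons_self
    have hfa : fa bk = av := ha (bk, av) List.mem_cons_self
    have hbknbs : bk ∉ bs.map Prod.fst := by
      intro hmem
      rcases List.mem_map.mp hmem with ⟨q, hq, hqk⟩
      exact absurd (hqk ▸ (List.pairwise_cons.mp hbs).1 q hq) (lt_irrefl _)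
    have hbknas : bk ∉ as_.map Prod.fst := by
      intro hmem
      rcases List.mem_map.mp hmem with ⟨q, hq, hqk⟩
      exact absurd (hqk ▸ (List.pairwise_cons.mp has).1 q hq) (lt_irrefl _)
    simp only [pvMergeDelta, pvMergeKeys, List.map_cons, if_neg h, List.map]
    refine List.cons_eq_cons.mpr ⟨by simp [hfa, hfb], ?_⟩
    refine ih (fun p hp => hb p (List.mem_cons_of_mem _ hp))
        (fun p hp => ha p (List.mem_cons_of_mem _ hp)) ?_ ?_
        (List.pairwise_cons.mp hbs).2 (List.pairwise_cons.mp has).2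
    · intro k hk hknb
      refine hb0 k (by simp only [List.map_cons, List.mem_cons]; exact Or.inr hk) ?_
      simp only [List.map_cons, List.mem_cons]
      rintro (rfl | hmem)
      · exact hbknas hk
      · exact hknb hmem
    · intro k hk hkna
      refine ha0 k (by simp only [List.map_cons, List.mem_cons]; exact Or.inr hk) ?_
      simp only [List.map_cons, List.mem_cons]
      rintro (rfl | hmem)
      · exact hbknbs hk
      · exact hkna hmem
  | case4 as_ =>
    simp only [pvMergeDelta, List.map_nil, pvMergeKeys, List.map_map]
    refine Eq.symm ((List.map_congr_left ?_).trans (List.map_id as_))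
    intro p hp
    have h2 : fb p.1 = 0 := hb0 p.1 (List.mem_map_of_mem hp) (by simp)
    simp [Function.comp, ha p hp, h2]
  | case5 bs h =>
    cases bs with
    | nil => exact absurd rfl h
    | cons p t =>
      simp only [pvMergeDelta, List.map_cons, List.map_nil, pvMergeKeys, List.map_map]
      refine List.cons_eq_cons.mpr ⟨?_, ?_⟩
      · have h2 : fa p.1 = 0 := ha0 p.1 (by simp) (by simp)
        simp [hb p List.mem_cons_self, h2]
      · refine Eq.symm (List.map_congr_left ?_)
        intro q hq
        have h2 : fa q.1 = 0 := ha0 q.1 (by simp [List.mem_map_of_mem hq]) (by simp)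
        simp [Function.comp, hb q (List.mem_cons_of_mem _ hq), h2]

theorem counter_delta_eq (before after : List (String × Int)) :
    counter_delta_py before after = counter_delta_py_alt before after := by
  dsimp only [counter_delta_py, counter_delta_py_alt]
  set db := PySem.Dict.ofList before with hdbdef
  set da := PySem.Dict.ofList after with hdadef
  set b := PySem.List.sorted db.items (fun kv => kv.1) false with hbdef
  set a := PySem.List.sorted da.items (fun kv => kv.1) false with hadef
  have hdbnd : db.keys.Nodup := PySem.Dict.nodup_keys_ofList before
  have handd : da.keys.Nodup := PySem.Dict.nodup_keys_ofList after
  -- the sorted item lists carry exactly the dict's keys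
  have hbkperm : (b.map (fun kv => kv.1)).Perm db.keys := by
    simpa [PySem.Dict.keys] using (PySem.List.sorted_perm db.items (fun kv => kv.1) false).map (fun kv => kv.1)
  have hakperm : (a.map (fun kv => kv.1)).Perm da.keys := by
    simpa [PySem.Dict.keys] using (PySem.List.sorted_perm da.items (fun kv => kv.1) false).map (fun kv => kv.1)
  have hbklt : (b.map (fun kv => kv.1)).Pairwise (· < ·) :=
    pv_pairwise_lt_of_le_nodup _ (PySem.List.sorted_map_key_pairwise db.items (fun kv => kv.1))
      (hbkperm.nodup_iff.mpr hdbnd)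
  have haklt : (a.map (fun kv => kv.1)).Pairwise (· < ·) :=
    pv_pairwise_lt_of_le_nodup _ (PySem.List.sorted_map_key_pairwise da.items (fun kv => kv.1))
      (hakperm.nodup_iff.mpr handd)
  -- A's sorted key union IS the key order the merge produces
  have hUnd : ((PySem.Set.ofList db.keys).union da.keys).Nodup :=
    PySem.Set.nodup_union (PySem.Set.ofList db.keys) da.keys (PySem.Set.nodup_ofList db.keys)
  have hUeq : PySem.List.sorted ((PySem.Set.ofList db.keys).union da.keys) (fun k => k) false
      = pvMergeKeys (b.map (fun kv => kv.1)) (a.map (fun kv => kv.1)) := by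
    apply PySem.List.sorted_eq_of_perm_of_pairwise_lt
    · refine (List.perm_ext_iff_of_nodup ((pv_pairwise_mergeKeys _ _ hbklt haklt).imp ne_of_lt) hUnd).mpr ?_
      intro x
      rw [pv_mem_mergeKeys, PySem.Set.mem_union, PySem.Set.mem_ofList,
        hbkperm.mem_iff, hakperm.mem_iff]
    · exact pv_pairwise_mergeKeys _ _ hbklt haklt
  -- hypotheses of the merge characterisation
  have hblook : ∀ p ∈ b, db.getD p.1 0 = p.2 := by
    intro p hp
    have hpi : (p.1, p.2) ∈ db.items := by
      simpa using (PySem.List.mem_sorted _ _ _ _).mp hp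
    exact PySem.Dict.getD_of_mem_items db hpi hdbnd 0
  have halook : ∀ p ∈ a, da.getD p.1 0 = p.2 := by
    intro p hp
    have hpi : (p.1, p.2) ∈ da.items := by
      simpa using (PySem.List.mem_sorted _ _ _ _).mp hp
    exact PySem.Dict.getD_of_mem_items da hpi handd 0
  have hbmiss : ∀ k, k ∉ b.map (fun kv => kv.1) → db.getD k 0 = 0 := by
    intro k hk
    refine PySem.Dict.getD_of_not_contains db 0 ?_
    have : k ∉ db.keys := fun hmem => hk (hbkperm.mem_iff.mpr hmem)
    simp [PySem.Dict.contains_eq_decide_mem_keys, this]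
  have hamiss : ∀ k, k ∉ a.map (fun kv => kv.1) → da.getD k 0 = 0 := by
    intro k hk
    refine PySem.Dict.getD_of_not_contains da 0 ?_
    have : k ∉ da.keys := fun hmem => hk (hakperm.mem_iff.mpr hmem)
    simp [PySem.Dict.contains_eq_decide_mem_keys, this]
  -- B's merge, characterised over the sorted union key list
  have hmerge : pvMergeDelta b a
      = (PySem.List.sorted ((PySem.Set.ofList db.keys).union da.keys) (fun k => k) false).map
          (fun k => (k, da.getD k 0 - db.getD k 0)) := by
    rw [hUeq]
    exact pv_mergeDelta_eq (fun k => db.getD k 0) (fun k => da.getD k 0) b a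
      hblook halook (fun k _ hk => hbmiss k hk) (fun k _ hk => hamiss k hk)
      (List.pairwise_map.mp hbklt) (List.pairwise_map.mp haklt)
  set U := PySem.List.sorted ((PySem.Set.ofList db.keys).union da.keys) (fun k => k) false with hUdef
  have hUnodup : U.Nodup := (PySem.List.sorted_perm _ _ _).nodup_iff.mpr hUnd
  -- A's loop: filter then insert the fresh keys in order
  rw [PySem.List.foldl_ite_eq_foldl_filter
        (p := fun key => da.getD key 0 - db.getD key 0 ≠ 0)
        (f := fun (delta : PySem.Dict String Int) key => delta.insert key (da.getD key 0 - db.getD key 0))]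
  have hA := PySem.Dict.items_foldl_insert_fresh
        (U.filter (fun key => decide (da.getD key 0 - db.getD key 0 ≠ 0)))
        (fun key => key) (fun key => da.getD key 0 - db.getD key 0) PySem.Dict.empty
        (fun x _ => PySem.Dict.contains_empty x)
        (by simpa using hUnodup.filter (fun key => decide (da.getD key 0 - db.getD key 0 ≠ 0)))
  rw [hA]
  -- B's dict-of-pairs: insert fresh keys too
  rw [hmerge, List.filter_map]
  have hofList : ∀ (l : List (String × Int)), PySem.Dict.ofList l
      = l.foldl (fun (d : PySem.Dict String Int) p => d.insert p.1 p.2) PySem.Dict.empty := fun l => rfl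
  have hB := PySem.Dict.items_foldl_insert_fresh
        ((U.filter ((fun (p : String × Int) => decide (p.2 ≠ 0)) ∘ fun k => (k, da.getD k 0 - db.getD k 0))).map
          (fun k => (k, da.getD k 0 - db.getD k 0)))
        (fun (p : String × Int) => p.1) (fun (p : String × Int) => p.2) PySem.Dict.empty
        (fun x _ => PySem.Dict.contains_empty x.1)
        (by simp only [List.map_map]
            have hid : ((fun (p : String × Int) => p.1) ∘ fun k => (k, da.getD k 0 - db.getD k 0)) = id := rfl
            rw [hid, List.map_id]
            exact hUnodup.filter _)
  rw [hofList, hB]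
  simp [Function.comp_def]

-- ===== VERDICT (by name: the statement is the Claim_ definition above) =====
theorem counter_delta_py_spec : Claim_equal_counter_delta_py := by
  intro before after _
  exact counter_delta_eq before after
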